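-- pv_equiv track=rewrite | github.com/javieruhk/RecipeManager | BEDCA-foodex2 matcher.py | create_BEDCA_foodex2_matches_list
-- ===== SOURCE A (Python) =====
-- def create_BEDCA_foodex2_matches_list(BEDCA_food_lemas_list, foodex2_dict_lemmatized):
-- 	BEDCA_foodex2_matches_list = []
-- 	maximum_matches = 0
--
-- 	for foodex2_code in foodex2_dict_lemmatized:
-- 		matches = 0
--
-- 		for lema in BEDCA_food_lemas_list:
-- 			for foodex2_food_lemas in foodex2_dict_lemmatized[foodex2_code]:
-- 				if lema in foodex2_food_lemas:
-- 					matches = matches+1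
-- 					break#si no puede contar el mismo match dos veces
--
-- 		matches = matches+1
--
-- 		if matches > maximum_matches:
-- 			maximum_matches = matches
-- 			BEDCA_foodex2_matches_list = [foodex2_code]
-- 		elif matches == maximum_matches and maximum_matches != 0:
-- 			BEDCA_foodex2_matches_list.append(foodex2_code)
--
-- 	return BEDCA_foodex2_matches_list
-- ===== SOURCE B (Python) =====
-- def create_BEDCA_foodex2_matches_list(BEDCA_food_lemas_list, foodex2_dict_lemmatized):
-- 	codes = list(foodex2_dict_lemmatized)
-- 	if not codes:
-- 		return []
-- 	# inverted index: lemma -> set of codes whose groups mention it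
-- 	index = {}
-- 	for code, groups in foodex2_dict_lemmatized.items():
-- 		for group in groups:
-- 			for lema in group:
-- 				index.setdefault(lema, set()).add(code)
-- 	counts = dict.fromkeys(codes, 0)
-- 	for lema in BEDCA_food_lemas_list:
-- 		for code in index.get(lema, ()):
-- 			counts[code] += 1
-- 	best = max(counts.values())
-- 	return [code for code in codes if counts[code] == best]
-- ===== Notes on version B (the rewrite author's own statement) =====
-- stated objective: faster
-- what changed: Replaces A's code-major rescan of every lemma group per BEDCA lemma and its running-max reset-or-append state machine by an inverted index (lemma -> set of codes) built once from the dict, lemma-major accumulation of per-code counts by incrementing through the index, then max over the count dict and a filter of the codes attaining it (the uniform +1 is dropped as it cannot affect the argmax).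
import Mathlib
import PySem

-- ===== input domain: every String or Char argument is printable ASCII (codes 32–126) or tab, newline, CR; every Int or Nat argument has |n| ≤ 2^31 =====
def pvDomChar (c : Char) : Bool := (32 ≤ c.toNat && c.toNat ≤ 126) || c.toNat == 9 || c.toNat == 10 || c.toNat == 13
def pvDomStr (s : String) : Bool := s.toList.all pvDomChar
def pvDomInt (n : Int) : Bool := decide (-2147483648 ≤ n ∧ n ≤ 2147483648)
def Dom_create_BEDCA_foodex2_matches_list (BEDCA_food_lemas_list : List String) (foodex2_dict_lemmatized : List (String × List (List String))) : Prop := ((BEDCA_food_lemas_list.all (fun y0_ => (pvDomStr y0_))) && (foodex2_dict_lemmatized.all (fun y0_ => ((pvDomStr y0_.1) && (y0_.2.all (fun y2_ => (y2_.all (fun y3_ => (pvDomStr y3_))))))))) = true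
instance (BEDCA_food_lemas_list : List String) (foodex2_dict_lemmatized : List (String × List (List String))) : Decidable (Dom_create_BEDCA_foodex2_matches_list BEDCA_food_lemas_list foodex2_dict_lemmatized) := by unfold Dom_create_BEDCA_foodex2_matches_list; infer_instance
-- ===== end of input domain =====

-- B replaces A's per-code rescans and running-max state machine by a different data structure: an
-- inverted index (lemma -> set of codes) built once, counts accumulated lemma-major by incrementing
-- through the index, then max + filter (objective: faster).


-- ===== PORT A =====
def create_BEDCA_foodex2_matches_list (BEDCA_food_lemas_list : List String) (foodex2_dict_lemmatized : List (String × List (List String))) : List String :=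
  let d := PySem.Dict.ofList foodex2_dict_lemmatized
  (d.keys.foldl (fun st foodex2_code =>
      -- inner two loops with break: lema counted once iff some group contains it
      let nmatches : Int :=
        (BEDCA_food_lemas_list.foldl (fun m lema =>
            if (d.getD foodex2_code []).any (fun g => g.contains lema) then m + 1 else m) 0) + 1
      if st.2 < nmatches then ([foodex2_code], nmatches)
      else if nmatches = st.2 ∧ st.2 ≠ 0 then (st.1 ++ [foodex2_code], st.2)
      else st)
    ([], (0 : Int))).1

-- ===== PORT B =====
def create_BEDCA_foodex2_matches_list_alt (BEDCA_food_lemas_list : List String) (foodex2_dict_lemmatized : List (String × List (List String))) : List String :=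
  let d := PySem.Dict.ofList foodex2_dict_lemmatized
  let codes := d.keys
  if codes.isEmpty then []
  else
    -- index.setdefault(lema, set()).add(code): insert-or-create then mutate the stored set
    let idx : PySem.Dict String (PySem.Set String) :=
      d.items.foldl (fun idx p =>
        p.2.foldl (fun idx group =>
          group.foldl (fun idx lema =>
            idx.insert lema (PySem.Set.add (idx.getD lema PySem.Set.empty) p.1)) idx) idx)
        PySem.Dict.empty
    -- counts = dict.fromkeys(codes, 0)
    let counts0 : PySem.Dict String Int :=
      codes.foldl (fun c k => c.insert k 0) PySem.Dict.empty
    -- for lema in …: for code in index.get(lema, ()): counts[code] += 1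
    let counts :=
      BEDCA_food_lemas_list.foldl (fun c lema =>
        (idx.getD lema PySem.Set.empty).foldl (fun c code => c.modify code 0 (· + 1)) c) counts0
    match PySem.List.max? counts.values (fun v => v) with
    | none => []  -- unreachable: counts has the (nonempty) codes as keys
    | some best => codes.filter (fun code => counts.getD code 0 == best)

-- ===== PRECONDITION & SPEC =====
def Spec_create_BEDCA_foodex2_matches_list (BEDCA_food_lemas_list : List String) (foodex2_dict_lemmatized : List (String × List (List String))) (out : List String) : Prop := out = create_BEDCA_foodex2_matches_list_alt BEDCA_food_lemas_list foodex2_dict_lemmatized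
instance (BEDCA_food_lemas_list : List String) (foodex2_dict_lemmatized : List (String × List (List String))) (out : List String) : Decidable (Spec_create_BEDCA_foodex2_matches_list BEDCA_food_lemas_list foodex2_dict_lemmatized out) := by unfold Spec_create_BEDCA_foodex2_matches_list; infer_instance

-- ===== CLAIM (what is proved, stated in full; the proofs are below) =====
def Claim_equal_create_BEDCA_foodex2_matches_list : Prop := ∀ (BEDCA_food_lemas_list : List String) (foodex2_dict_lemmatized : List (String × List (List String))), Dom_create_BEDCA_foodex2_matches_list BEDCA_food_lemas_list foodex2_dict_lemmatized → Spec_create_BEDCA_foodex2_matches_list BEDCA_food_lemas_list foodex2_dict_lemmatized (create_BEDCA_foodex2_matches_list BEDCA_food_lemas_list foodex2_dict_lemmatized)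

-- ===== LEMMAS AND PROOFS =====

-- A's loop body, abstracted to (code, count) pairs.
def pvStepA (st : List String × Int) (q : String × Int) : List String × Int :=
  if st.2 < q.2 + 1 then ([q.1], q.2 + 1)
  else if q.2 + 1 = st.2 ∧ st.2 ≠ 0 then (st.1 ++ [q.1], st.2)
  else st

-- the running maximum A maintains
def pvRun (qs : List (String × Int)) (M : Int) : Int :=
  (qs.map (fun q => q.2 + 1)).foldl max M

theorem pvRun_cons (q : String × Int) (t : List (String × Int)) (M : Int) :
    pvRun (q :: t) M = pvRun t (max M (q.2 + 1)) := rfl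

theorem le_pvRun (qs : List (String × Int)) (M : Int) : M ≤ pvRun qs M := by
  unfold pvRun
  exact (PySem.List.le_foldl_max _ _).1

theorem pvRun_shift (t : List (String × Int)) (a : Int) :
    pvRun t (a + 1) = (t.map (fun q => q.2)).foldl max a + 1 := by
  induction t generalizing a with
  | nil => simp [pvRun]
  | cons q t ih =>
    have h : max (a + 1) (q.2 + 1) = max a q.2 + 1 := by omega
    rw [pvRun_cons, h, ih, List.map_cons, List.foldl_cons]

theorem pvLoopA (qs : List (String × Int)) (acc : List String) (M : Int) (hM : 1 ≤ M) :
    qs.foldl pvStepA (acc, M)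
      = ((if M < pvRun qs M then [] else acc)
          ++ (qs.filter (fun q => q.2 + 1 == pvRun qs M)).map Prod.fst,
         pvRun qs M) := by
  induction qs generalizing acc M with
  | nil => simp [pvRun]
  | cons q t ih =>
    rw [List.foldl_cons, pvRun_cons]
    have hvB : q.2 + 1 ≤ pvRun t (max M (q.2 + 1)) := by
      have := le_pvRun t (max M (q.2 + 1)); omega
    rcases lt_trichotomy M (q.2 + 1) with h1 | h1 | h1
    · have hstep : pvStepA (acc, M) q = ([q.1], q.2 + 1) := by
        simp [pvStepA, h1]
      have hmax : max M (q.2 + 1) = q.2 + 1 := by omega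
      rw [hstep, ih [q.1] (q.2 + 1) (by omega), hmax]
      rw [hmax] at hvB
      have hMlt : M < pvRun t (q.2 + 1) := by omega
      by_cases htop : q.2 + 1 = pvRun t (q.2 + 1)
      · simp [← htop, h1]
      · have hlt : q.2 + 1 < pvRun t (q.2 + 1) := by omega
        have hne : (q.2 + 1 == pvRun t (q.2 + 1)) = false := by
          simp; omega
        simp [hlt, hne, hMlt]
    · have hstep : pvStepA (acc, M) q = (acc ++ [q.1], M) := by
        simp only [pvStepA]
        rw [if_neg (by omega), if_pos ⟨by omega, by omega⟩]
      have hmax : max M (q.2 + 1) = M := by omega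
      rw [hstep, ih (acc ++ [q.1]) M hM, hmax]
      rw [hmax] at hvB
      by_cases htop : M = pvRun t M
      · rw [← htop, if_neg (lt_irrefl M), if_neg (lt_irrefl M), List.filter_cons,
          if_pos (by simp [h1]), List.map_cons]
        simp
      · have hlt : M < pvRun t M := by have := le_pvRun t M; omega
        have hne : (q.2 + 1 == pvRun t M) = false := by simp; omega
        simp [hlt, hne]
    · have hstep : pvStepA (acc, M) q = (acc, M) := by
        simp only [pvStepA]
        rw [if_neg (by omega), if_neg (by rintro ⟨ha, -⟩; omega)]
      have hmax : max M (q.2 + 1) = M := by omega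
      rw [hstep, ih acc M hM, hmax]
      rw [hmax] at hvB
      have hMle := le_pvRun t M
      have hne : (q.2 + 1 == pvRun t M) = false := by simp; omega
      simp [hne]

-- inserting never shrinks a dict
theorem pvSize_le {κ ν : Type} [BEq κ] (l : List (κ × ν)) (d : PySem.Dict κ ν) :
    d.size ≤ (l.foldl (fun acc p => acc.insert p.1 p.2) d).size := by
  induction l generalizing d with
  | nil => simp
  | cons p t ih =>
    rw [List.foldl_cons]
    refine le_trans ?_ (ih (d.insert p.1 p.2))
    rw [PySem.Dict.size_insert]
    split <;> omega

-- scanning the groups = membership in the flattened groups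
theorem pvAnyFlat (groups : List (List String)) (lema : String) :
    groups.any (fun g => g.contains lema) = groups.flatten.contains lema := by
  rw [Bool.eq_iff_iff]
  simp [List.any_eq_true, List.mem_flatten]

-- B's index-building step on (code, lemma) pairs
def pvStepIdx (idx : PySem.Dict String (PySem.Set String)) (q : String × String) : PySem.Dict String (PySem.Set String) :=
  idx.insert q.2 (PySem.Set.add (idx.getD q.2 PySem.Set.empty) q.1)

-- the triple nested index loop is the fold of pvStepIdx over the flattened (code, lemma) pairs
theorem pvIdxFlat (ps : List (String × List (List String))) (idx : PySem.Dict String (PySem.Set String)) :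
    ps.foldl (fun idx p =>
        p.2.foldl (fun idx group =>
          group.foldl (fun idx lema =>
            idx.insert lema (PySem.Set.add (idx.getD lema PySem.Set.empty) p.1)) idx) idx) idx
      = (ps.flatMap (fun p => p.2.flatten.map (fun l => (p.1, l)))).foldl pvStepIdx idx := by
  rw [List.foldl_flatMap]
  congr 1
  funext b p
  rw [List.foldl_map, List.foldl_flatten]
  simp [pvStepIdx]

-- membership in the built index
theorem pvIdxMem (qs : List (String × String)) (idx : PySem.Dict String (PySem.Set String)) (l c : String) :
    c ∈ ((qs.foldl pvStepIdx idx).getD l PySem.Set.empty) ↔ c ∈ idx.getD l PySem.Set.empty ∨ (c, l) ∈ qs := by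
  induction qs generalizing idx with
  | nil => simp
  | cons q t ih =>
    rw [List.foldl_cons, ih]
    by_cases h : l = q.2 <;>
      simp only [pvStepIdx, PySem.Dict.getD_insert, h, if_pos,
        PySem.Set.mem_add, List.mem_cons, Prod.ext_iff] <;>
      tauto

-- every value set in the built index is duplicate-free
theorem pvIdxNodup (qs : List (String × String)) (idx : PySem.Dict String (PySem.Set String))
    (hnd : ∀ l, (idx.getD l PySem.Set.empty).Nodup) (l : String) :
    ((qs.foldl pvStepIdx idx).getD l PySem.Set.empty).Nodup := by
  induction qs generalizing idx with
  | nil => exact hnd l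
  | cons q t ih =>
    rw [List.foldl_cons]
    refine ih _ ?_
    intro l'
    unfold pvStepIdx
    rw [PySem.Dict.getD_insert]
    split
    · exact PySem.Set.nodup_add _ _ (hnd q.2)
    · exact hnd l'

-- counting occurrences across concatenated duplicate-free blocks = counting matching blocks
theorem pvCountFlat (ls : List String) (f : String → List String) (hnd : ∀ l, (f l).Nodup) (c : String) :
    (ls.flatMap f).count c = ls.countP (fun l => (f l).contains c) := by
  induction ls with
  | nil => simp
  | cons a t ih =>
    rw [List.flatMap_cons, List.count_append, ih, List.countP_cons]
    by_cases h : c ∈ f a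
    · rw [List.count_eq_one_of_mem (hnd a) h, if_pos (by simpa using h)]
      omega
    · rw [List.count_eq_zero.mpr h, if_neg (by simpa using h)]
      omega

-- dict.fromkeys(codes, 0): every lookup with default 0 gives 0
theorem pvGetD0 (l : List String) (d : PySem.Dict String Int) (h : ∀ v, d.getD v 0 = 0) (v : String) :
    (l.foldl (fun c k => c.insert k 0) d).getD v 0 = 0 := by
  induction l generalizing d with
  | nil => exact h v
  | cons a t ih =>
    rw [List.foldl_cons]
    refine ih _ ?_ 
    intro w
    rw [PySem.Dict.getD_insert]
    split
    · rfl
    · exact h w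

-- updating a set with elements it already has changes nothing
theorem pvUpdateSub (s l : List String) (h : ∀ x ∈ l, x ∈ s) : PySem.Set.update s l = s := by
  rw [PySem.Set.update_eq_append_filter]
  have hf : (PySem.Set.ofList l).filter (fun y => !(PySem.Set.contains s y)) = [] := by
    rw [List.filter_eq_nil_iff]
    intro y hy
    have := h y ((PySem.Set.mem_ofList _ _).mp hy)
    simp [this]
  rw [hf, List.append_nil]

theorem create_BEDCA_foodex2_matches_list_spec : Claim_equal_create_BEDCA_foodex2_matches_list := by
  intro ls fx _dom
  unfold Spec_create_BEDCA_foodex2_matches_list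
  unfold create_BEDCA_foodex2_matches_list create_BEDCA_foodex2_matches_list_alt
  cases fx with
  | nil => rfl
  | cons p0 fx' =>
    set d := PySem.Dict.ofList (p0 :: fx') with hd
    have hnd : d.keys.Nodup := PySem.Dict.nodup_keys_ofList _
    set ps := d.items with hps
    have hkeys : d.keys = ps.map Prod.fst := rfl
    -- d is nonempty
    have hps0 : ps ≠ [] := by
      have h2 : (PySem.Dict.empty.insert p0.1 p0.2 :
          PySem.Dict String (List (List String))).size ≤ d.size := by
        rw [hd]
        exact pvSize_le fx' _
      have h3 : (PySem.Dict.empty.insert p0.1 p0.2 :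
          PySem.Dict String (List (List String))).size = 1 := by
        rw [PySem.Dict.size_insert]
        simp [PySem.Dict.contains_empty]
      have h1 : 1 ≤ ps.length := by have hds : 1 ≤ d.size := by omega
                                    exact hds
      intro h
      rw [h] at h1
      simp at h1
    have hk0 : d.keys.isEmpty = false := by
      rw [List.isEmpty_eq_false_iff, hkeys]
      simp only [ne_eq, List.map_eq_nil_iff]
      exact hps0
    simp only [hk0, Bool.false_eq_true, if_false]
    -- the per-code match count both sides compute
    set n : String × List (List String) → Int :=
      fun p => ((ls.countP (fun lema => p.2.flatten.contains lema) : Nat) : Int) with hn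
    set qs : List (String × Int) := ps.map (fun p => (p.1, n p)) with hqs
    have hndq : (qs.map Prod.fst).Nodup := by
      rw [hqs, List.map_map]
      exact hnd
    have hnn : ∀ x ∈ qs, 0 ≤ x.2 := by
      rintro x hx
      rw [hqs] at hx
      obtain ⟨p', -, rfl⟩ := List.mem_map.1 hx
      simp [hn]
    -- ===== A's fold over keys = abstract fold over qs =====
    have hA : (d.keys.foldl (fun st foodex2_code =>
          if st.2 < (ls.foldl (fun m lema =>
              if (d.getD foodex2_code []).any (fun g => g.contains lema) then m + 1 else m) 0) + 1
          then ([foodex2_code],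
            (ls.foldl (fun m lema =>
              if (d.getD foodex2_code []).any (fun g => g.contains lema) then m + 1 else m) 0) + 1)
          else if (ls.foldl (fun m lema =>
              if (d.getD foodex2_code []).any (fun g => g.contains lema) then m + 1 else m) 0) + 1 = st.2 ∧ st.2 ≠ 0
            then (st.1 ++ [foodex2_code], st.2)
          else st) ([], (0 : Int)))
        = qs.foldl pvStepA ([], 0) := by
      rw [hkeys, List.foldl_map, hqs, List.foldl_map]
      apply PySem.List.foldl_congr_mem
      intro acc x hx
      have hget : d.getD x.1 [] = x.2 :=
        PySem.Dict.getD_of_mem_items d (by simpa [hps] using hx) hnd []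
      rw [hget, PySem.List.foldl_if_add_one]
      simp only [pvStepA, hn, zero_add]
      rw [List.countP_congr (fun lema _ => by rw [pvAnyFlat])]
    -- ===== B's index =====
    set qsIdx : List (String × String) := ps.flatMap (fun p => p.2.flatten.map (fun l => (p.1, l))) with hqsIdx
    set idx : PySem.Dict String (PySem.Set String) :=
      ps.foldl (fun idx p =>
        p.2.foldl (fun idx group =>
          group.foldl (fun idx lema =>
            idx.insert lema (PySem.Set.add (idx.getD lema PySem.Set.empty) p.1)) idx) idx)
        PySem.Dict.empty with hidx
    have hidxf : idx = qsIdx.foldl pvStepIdx PySem.Dict.empty := by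
      rw [hidx, pvIdxFlat]
    have hmemIdx : ∀ l c, c ∈ idx.getD l PySem.Set.empty ↔ (c, l) ∈ qsIdx := by
      intro l c
      rw [hidxf, pvIdxMem]
      simp [PySem.Dict.getD_empty, PySem.Set.empty]
    have hndIdx : ∀ l, (idx.getD l PySem.Set.empty).Nodup := by
      intro l
      rw [hidxf]
      exact pvIdxNodup _ _ (fun l' => by simp [PySem.Dict.getD_empty, PySem.Set.empty]) l
    -- membership of (c, l) in qsIdx for a key c of d
    have hinj : ∀ x ∈ ps, ∀ y ∈ ps, x.1 = y.1 → x = y :=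
      fun x hx y hy he => List.inj_on_of_nodup_map (hkeys ▸ hnd) hx hy he
    have hmem2 : ∀ x ∈ ps, ∀ l, ((x.1, l) ∈ qsIdx ↔ l ∈ x.2.flatten) := by
      intro x hx l
      rw [hqsIdx]
      simp only [List.mem_flatMap, List.mem_map, Prod.mk.injEq]
      constructor
      · rintro ⟨p', hp', l', hl', h1, h2⟩
        have hpx : p' = x := hinj p' hp' x hx h1
        subst hpx
        subst h2
        exact hl'
      · intro hl
        exact ⟨x, hx, l, hl, rfl, rfl⟩
    -- ===== B's counts dict =====
    set counts0 : PySem.Dict String Int :=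
      d.keys.foldl (fun c k => c.insert k 0) PySem.Dict.empty with hc0
    set Lflat : List String := ls.flatMap (fun lema => (idx.getD lema PySem.Set.empty : List String)) with hL
    set counts :=
      ls.foldl (fun c lema =>
        (idx.getD lema PySem.Set.empty).foldl (fun c code => c.modify code 0 (· + 1)) c) counts0 with hc
    have hcflat : counts = Lflat.foldl (fun c code => c.modify code 0 (· + 1)) counts0 := by
      rw [hc, hL, List.foldl_flatMap]
    -- value of counts at any key
    have hcget : ∀ v, counts.getD v 0 = ((Lflat.count v : Nat) : Int) := by
      intro v
      rw [hcflat, PySem.Dict.getD_foldl_modify_add_one,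
        pvGetD0 _ _ (fun w => PySem.Dict.getD_empty w 0) v, zero_add]
    -- count in Lflat for a key of d is the match count
    have hcnt : ∀ x ∈ ps, counts.getD x.1 0 = n x := by
      intro x hx
      rw [hcget, pvCountFlat ls _ hndIdx, hn]
      congr 1
      apply List.countP_congr
      intro lema _
      constructor
      · intro h
        have hm : lema ∈ x.2.flatten :=
          (hmem2 x hx lema).1 ((hmemIdx lema x.1).1 (by simpa using h))
        simpa using hm
      · intro h
        have : x.1 ∈ idx.getD lema PySem.Set.empty :=
          (hmemIdx lema x.1).2 ((hmem2 x hx lema).2 (by simpa using h))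
        simpa using this
    -- keys of counts
    have hkc0 : counts0.keys = d.keys := by
      rw [hc0, PySem.Dict.keys_foldl_insert, PySem.Dict.keys_empty, PySem.Set.update_nil_left]
      exact PySem.Set.ofList_eq_self_of_nodup _ hnd
    have hLsub : ∀ x ∈ Lflat, x ∈ d.keys := by
      intro x hx
      rw [hL] at hx
      obtain ⟨lema, -, hmem⟩ := List.mem_flatMap.1 hx
      obtain ⟨p', hp', l', -, heq⟩ := by
        have := (hmemIdx lema x).1 hmem
        rw [hqsIdx] at this
        simpa only [List.mem_flatMap, List.mem_map] using this
      obtain ⟨h1, -⟩ := Prod.mk.injEq .. ▸ heq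
      rw [hkeys, ← h1]
      exact List.mem_map_of_mem hp'
    have hkc : counts.keys = d.keys := by
      rw [hcflat, PySem.Dict.keys_foldl_modify, hkc0, pvUpdateSub _ _ hLsub]
    have hndc : counts.keys.Nodup := by rw [hkc]; exact hnd
    have hitems : counts.items = qs := by
      rw [PySem.Dict.items_eq_map_keys counts hndc 0, hkc, hkeys, List.map_map, hqs]
      apply List.map_congr_left
      intro x hx
      simp only [Function.comp]
      rw [hcnt x hx]
    have hvc : counts.values = qs.map Prod.snd := by
      show counts.items.map Prod.snd = _
      rw [hitems]
    -- ===== endgame: both reduce to qs =====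
    obtain ⟨q, tq, hqt⟩ := List.exists_cons_of_ne_nil (by
      rw [hqs]
      intro h
      exact hps0 (List.map_eq_nil_iff.1 h) : qs ≠ [])
    rw [hA, hvc, hqt]
    rw [List.map_cons, PySem.List.max?_id_cons]
    set best := ((tq.map Prod.snd).foldl max q.2) with hbest
    have hq2 : q.2 ≤ best := by
      rw [hbest]; exact (PySem.List.le_foldl_max _ _).1
    have hq0 : 0 ≤ q.2 := hnn q (by rw [hqt]; exact List.mem_cons_self)
    rw [List.foldl_cons]
    have hstep1 : pvStepA ([], (0 : Int)) q = ([q.1], q.2 + 1) := by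
      simp only [pvStepA]
      rw [if_pos (by omega)]
    rw [hstep1, pvLoopA tq [q.1] (q.2 + 1) (by omega)]
    have hrun : pvRun tq (q.2 + 1) = best + 1 := by
      rw [pvRun_shift, hbest]
    have hpf : List.map Prod.fst qs = List.map Prod.fst ps := by
      rw [hqs, List.map_map]
      rfl
    rw [hkeys, ← hpf]
    have hmatch : (match some best with
        | none => ([] : List String)
        | some b => (qs.map Prod.fst).filter (fun code => counts.getD code 0 == b))
        = (qs.map Prod.fst).filter (fun code => counts.getD code 0 == best) := rfl
    rw [hmatch, hqt]
    have hfil : ∀ x ∈ (q :: tq),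
        ((fun code => counts.getD code 0 == best) ∘ Prod.fst) x
          = ((fun x : String × Int => x.2 == best) x) := by
      intro x hx
      have : counts.getD x.1 0 = x.2 :=
        PySem.Dict.getD_of_mem_items counts (by rw [hitems, hqt]; simpa using hx) hndc 0
      simp only [Function.comp]
      rw [this]
    rw [List.filter_map, List.filter_congr hfil, hrun]
    have hsh : ∀ x : String × Int, (x.2 + 1 == best + 1) = (x.2 == best) := by
      intro x
      by_cases h : x.2 = best
      · simp [h]
      · have hne1 : ¬ (x.2 + 1 = best + 1) := by omega
        simp [h, hne1]
    rw [List.filter_congr (fun x _ => hsh x), List.filter_cons]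
    by_cases htop : q.2 = best
    · simp [htop]
    · have h1 : q.2 + 1 < best + 1 := by omega
      have h2 : (q.2 == best) = false := by simp [htop]
      simp [h1, h2]
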